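-- pv_equiv track=rewrite | github.com/hiimnhan/advent-of-code | solutions/utils/grid.py | connected_regions
-- ===== SOURCE A (Python) =====
-- def is_out_of_bounds(grid, r, c):
--     return r < 0 or c < 0 or r >= len(grid) or c >= len(grid[0])
--
-- def connected_regions(
--     grid,
-- ) -> dict[str, list[tuple[set[tuple[int, int]], int, int]]]:
--     R, C = len(grid), len(grid[0])
--     visited = [[False] * C for _ in range(R)]
--     regions = {}
--
--     def dfs(r, c, type):
--         if is_out_of_bounds(grid, r, c) or visited[r][c] or grid[r][c] != type:
--             return set(), set()
--         visited[r][c] = True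
--         region_plots = {(r, c)}
--         perimeter = set()
--
--         directions = [RIGHT, DOWN, LEFT, UP]
--         for dr, dc in directions:
--             nr, nc = r + dr, c + dc
--
--             if is_out_of_bounds(grid, nr, nc) or grid[nr][nc] != type:
--                 perimeter.add((r, c, dr, dc))
--                 continue
--
--             if not visited[nr][nc]:
--                 new_plots, new_perimeter = dfs(nr, nc, type)
--                 region_plots.update(new_plots)
--                 perimeter.update(new_perimeter)
--         return region_plots, perimeter
--
--     for r in range(R):
--         for c in range(C):
--             if visited[r][c]:
--                 continue
--             type = grid[r][c]
--             plots, perimeter = dfs(r, c, type)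
--             if plots:
--                 sides = {}
--                 for x, y, dr, dc in perimeter:
--                     if (dr, dc) in {UP, DOWN}:
--                         key = (x, (dr, dc))
--                         if key not in sides:
--                             sides[key] = []
--                         sides[key].append(y)
--                     elif (dr, dc) in {LEFT, RIGHT}:
--                         key = (y, (dr, dc))
--                         if key not in sides:
--                             sides[key] = []
--                         sides[key].append(x)
--                 total_sides = 0
--                 for v in sides.values():
--                     total_sides += 1
--                     v.sort()
--                     i = v.pop()
--                     while v:
--                         n = v.pop()
--                         if i - n > 1:
--                             total_sides += 1
--                         i = n
--
--                 if type not in regions: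
--                     regions[type] = []
--                 regions[type].append((plots, len(perimeter), total_sides))
--     return regions
--
-- UP = (-1, 0)
--
-- DOWN = (1, 0)
--
-- LEFT = (0, -1)
--
-- RIGHT = (0, 1)
-- ===== SOURCE B (Python) =====
-- UP = (-1, 0)
-- DOWN = (1, 0)
-- LEFT = (0, -1)
-- RIGHT = (0, 1)
--
--
-- def connected_regions(
--     grid,
-- ) -> dict[str, list[tuple[set[tuple[int, int]], int, int]]]:
--     R, C = len(grid), len(grid[0])
--     visited = [[False] * C for _ in range(R)]
--     regions = {}
--     DIRS = [RIGHT, DOWN, LEFT, UP]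
--
--     for r0 in range(R):
--         for c0 in range(C):
--             if visited[r0][c0]:
--                 continue
--             type = grid[r0][c0]
--             visited[r0][c0] = True
--             plots = {(r0, c0)}
--             perimeter = set()
--             # iterative flood fill: each stack item is a cell already accepted
--             # into the region together with its not-yet-explored directions
--             stack = [(r0, c0, DIRS)]
--             while stack:
--                 r, c, dirs = stack.pop()
--                 if not dirs:
--                     continue
--                 dr, dc = dirs[0]
--                 stack.append((r, c, dirs[1:]))
--                 nr, nc = r + dr, c + dc
--                 if (
--                     nr < 0
--                     or nc < 0
--                     or nr >= R
--                     or nc >= C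
--                     or grid[nr][nc] != type
--                 ):
--                     perimeter.add((r, c, dr, dc))
--                 elif not visited[nr][nc]:
--                     visited[nr][nc] = True
--                     plots.add((nr, nc))
--                     stack.append((nr, nc, DIRS))
--
--             sides = {}
--             for x, y, dr, dc in perimeter:
--                 if (dr, dc) in {UP, DOWN}:
--                     key = (x, (dr, dc))
--                     if key not in sides:
--                         sides[key] = []
--                     sides[key].append(y)
--                 elif (dr, dc) in {LEFT, RIGHT}:
--                     key = (y, (dr, dc))
--                     if key not in sides:
--                         sides[key] = []
--                     sides[key].append(x)
--             total_sides = 0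
--             for v in sides.values():
--                 total_sides += 1
--                 v.sort()
--                 i = v.pop()
--                 while v:
--                     n = v.pop()
--                     if i - n > 1:
--                         total_sides += 1
--                     i = n
--
--             if type not in regions:
--                 regions[type] = []
--             regions[type].append((plots, len(perimeter), total_sides))
--     return regions
-- ===== Notes on version B (the rewrite author's own statement) =====
-- stated objective: alternative
-- what changed: A's recursive per-cell DFS (building each region's plot/perimeter sets bottom-up through nested recursive calls) is replaced by an iterative flood fill over an explicit work stack of (cell, remaining-directions) items that accumulates the region's plots and perimeter edges in-place; the side-counting and row-major scan are unchanged.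
import Mathlib
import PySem

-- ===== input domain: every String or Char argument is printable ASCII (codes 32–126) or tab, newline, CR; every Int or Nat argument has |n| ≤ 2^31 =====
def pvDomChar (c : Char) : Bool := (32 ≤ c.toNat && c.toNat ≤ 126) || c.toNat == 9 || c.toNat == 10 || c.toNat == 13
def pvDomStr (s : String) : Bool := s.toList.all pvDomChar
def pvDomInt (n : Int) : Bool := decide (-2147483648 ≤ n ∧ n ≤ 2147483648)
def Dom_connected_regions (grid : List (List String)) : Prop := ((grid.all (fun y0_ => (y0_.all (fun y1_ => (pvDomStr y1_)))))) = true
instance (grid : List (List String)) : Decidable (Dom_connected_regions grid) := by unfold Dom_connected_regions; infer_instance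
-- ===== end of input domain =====

-- B replaces A's recursive depth-first search by an iterative explicit-stack flood fill
-- (alternative decomposition; same outputs, return value only — A/B mutate no arguments).

-- ===== shared module constants (UP/DOWN/LEFT/RIGHT of the Python module) and 2D-list primitives =====
def pvUP : Int × Int := (-1, 0)
def pvDOWN : Int × Int := (1, 0)
def pvLEFT : Int × Int := (0, -1)
def pvRIGHT : Int × Int := (0, 1)
def pvDirs : List (Int × Int) := [pvRIGHT, pvDOWN, pvLEFT, pvUP]

-- grid[r][c] (both programs read it only after the bounds guard, so the defaults are never consulted)
def pvGrid (grid : List (List String)) (r c : Int) : String :=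
  PySem.List.pyGetD (PySem.List.pyGetD grid r []) c ""

-- visited[r][c] (read only in bounds under Pre_; default true is a safe out-of-range value)
def pvVisGet (v : List (List Bool)) (r c : Int) : Bool :=
  PySem.List.pyGetD (PySem.List.pyGetD v r []) c true

-- visited[r][c] = True
def pvVisSet (v : List (List Bool)) (r c : Int) : List (List Bool) :=
  PySem.List.pySetD v r (PySem.List.pySetD (PySem.List.pyGetD v r []) c true)

-- is_out_of_bounds(grid, r, c)
def pvOOB (grid : List (List String)) (r c : Int) : Bool :=
  decide (r < 0) || decide (c < 0) || decide ((grid.length : Int) ≤ r) ||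
    decide (((PySem.List.pyGetD grid 0 []).length : Int) ≤ c)

-- number of False entries of visited (termination measure / fuel bound; not part of the Python)
def pvUnvisited (v : List (List Bool)) : Nat :=
  (v.map (fun row => row.count false)).sum

-- ===== PORT A =====
-- body of A's `for dr, dc in directions` loop inside dfs (dfsf = the recursive call at smaller fuel)
def pvA_step (grid : List (List String)) (ty : String)
    (dfsf : List (List Bool) → Int → Int →
      List (List Bool) × List (Int × Int) × List (Int × Int × Int × Int))
    (r c : Int)
    (st : List (List Bool) × List (Int × Int) × List (Int × Int × Int × Int))
    (d : Int × Int) :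
    List (List Bool) × List (Int × Int) × List (Int × Int × Int × Int) :=
  let nr := r + d.1
  let nc := c + d.2
  if pvOOB grid nr nc || !(pvGrid grid nr nc == ty) then
    (st.1, st.2.1, PySem.Set.add st.2.2 (r, c, d.1, d.2))
  else if pvVisGet st.1 nr nc then st
  else
    let res := dfsf st.1 nr nc
    (res.1, PySem.Set.update st.2.1 res.2.1, PySem.Set.update st.2.2 res.2.2)

-- A's recursive dfs; the fuel argument only totalizes the Python recursion (never exhausted:
-- every level marks a fresh cell, so unvisited-count+1 fuel suffices)
def pvA_dfs (grid : List (List String)) (ty : String) :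
    Nat → List (List Bool) → Int → Int →
      List (List Bool) × List (Int × Int) × List (Int × Int × Int × Int)
  | 0, v, _, _ => (v, [], [])
  | f + 1, v, r, c =>
    if pvOOB grid r c || pvVisGet v r c || !(pvGrid grid r c == ty) then (v, [], [])
    else pvDirs.foldl (pvA_step grid ty (pvA_dfs grid ty f) r c) (pvVisSet v r c, [(r, c)], [])

-- the `while v: n = v.pop(); …` gap scan (list already sorted; traversed from the popped end)
def pvA_scan : Int → List Int → Int
  | _, [] => 0
  | i, n :: rest => (if i - n > 1 then 1 else 0) + pvA_scan n rest

-- A's side-counting block: group perimeter edges, then count gaps per sorted group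
def pvA_sides (perimeter : List (Int × Int × Int × Int)) : Int :=
  let sides : PySem.Dict (Int × Int × Int) (List Int) :=
    perimeter.foldl (fun d e =>
      let x := e.1; let y := e.2.1; let dr := e.2.2.1; let dc := e.2.2.2
      if (dr, dc) == pvUP || (dr, dc) == pvDOWN then
        d.insert (x, dr, dc) ((d.getD (x, dr, dc) []) ++ [y])
      else if (dr, dc) == pvLEFT || (dr, dc) == pvRIGHT then
        d.insert (y, dr, dc) ((d.getD (y, dr, dc) []) ++ [x])
      else d) PySem.Dict.empty
  sides.values.foldl (fun total v =>
    match (PySem.List.sorted v (fun x => x) false).reverse with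
    | [] => total + 1            -- unreachable: every group holds at least one value
    | i :: rest => total + 1 + pvA_scan i rest) 0

def connected_regions (grid : List (List String)) :
    List (String × List ((List (Int × Int)) × Int × Int)) :=
  let R : Nat := grid.length
  let C : Nat := (PySem.List.pyGetD grid 0 []).length
  let fin :=
    (PySem.List.pyRange 0 (R : Int) 1).foldl (fun st r =>
      (PySem.List.pyRange 0 (C : Int) 1).foldl (fun st c =>
        if pvVisGet st.1 r c then st
        else
          let ty := pvGrid grid r c
          let res := pvA_dfs grid ty (pvUnvisited st.1 + 1) st.1 r c
          if res.2.1 ≠ [] then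
            (res.1, st.2.insert ty ((st.2.getD ty []) ++
              [(res.2.1, PySem.Set.len res.2.2, pvA_sides res.2.2)]))
          else (res.1, st.2)) st)
      (List.replicate R (List.replicate C false),
        (PySem.Dict.empty : PySem.Dict String (List ((List (Int × Int)) × Int × Int))))
  fin.2.items

-- ===== PORT B =====
-- termination support for B's while-loop: accepting a cell strictly lowers the number of
-- unvisited cells (pvVisSet_lt is cited by pvB_loop's decreasing_by)
theorem pvIdx_some_lt {n : Nat} {i : Int} {k : Nat}
    (h : PySem.List.pyIdx? n i = some k) : k < n := by
  unfold PySem.List.pyIdx? at h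
  split_ifs at h <;> simp_all <;> omega

theorem pvCount_set_true_lt (row : List Bool) (j : Nat) (hj : row[j]? = some false) :
    (row.set j true).count false < row.count false := by
  induction row generalizing j with
  | nil => simp at hj
  | cons b t ih =>
    cases j with
    | zero => simp_all
    | succ j =>
      simp only [List.getElem?_cons_succ] at hj
      have := ih j hj
      simp [List.count_cons]
      omega

theorem pvUnvisited_set_lt (v : List (List Bool)) (k : Nat) (row' : List Bool)
    (hk : k < v.length) (h : row'.count false < (v[k]).count false) :
    pvUnvisited (v.set k row') < pvUnvisited v := by
  induction v generalizing k with
  | nil => simp at hk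
  | cons r0 t ih =>
    cases k with
    | zero => simp_all [pvUnvisited]
    | succ k =>
      simp only [List.length_cons, Nat.succ_lt_succ_iff] at hk
      simp only [List.getElem_cons_succ] at h
      have := ih k hk h
      simp_all [pvUnvisited]

theorem pvVisSet_lt (v : List (List Bool)) (r c : Int) (h : pvVisGet v r c = false) :
    pvUnvisited (pvVisSet v r c) < pvUnvisited v := by
  unfold pvVisGet at h
  unfold pvVisSet
  rcases hk : PySem.List.pyIdx? v.length r with _ | k
  · exfalso
    have h0 : PySem.List.pyGetD v r [] = [] := by
      simp [PySem.List.pyGetD, PySem.List.pyGet?, hk]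
    rw [h0] at h
    revert h
    rcases PySem.List.pyIdx? ([] : List Bool).length c with _ | j <;>
      simp [PySem.List.pyGetD, PySem.List.pyGet?]
  · have hkl := pvIdx_some_lt hk
    have hrow : PySem.List.pyGetD v r [] = v[k] := by
      simp [PySem.List.pyGetD, PySem.List.pyGet?, hk, List.getElem?_eq_getElem hkl]
    rw [hrow] at h ⊢
    rcases hj : PySem.List.pyIdx? (v[k].length) c with _ | j
    · exfalso
      simp [PySem.List.pyGetD, PySem.List.pyGet?, hj] at h
    · have hjl := pvIdx_some_lt hj
      have hval : v[k][j] = false := by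
        simpa [PySem.List.pyGetD, PySem.List.pyGet?, hj, List.getElem?_eq_getElem hjl] using h
      have hset : PySem.List.pySetD (v[k]) c true = (v[k]).set j true := by
        simp [PySem.List.pySetD, PySem.List.pySet?, hj]
      have hsetv : PySem.List.pySetD v r ((v[k]).set j true) = v.set k ((v[k]).set j true) := by
        simp [PySem.List.pySetD, PySem.List.pySet?, hk]
      rw [hset, hsetv]
      exact pvUnvisited_set_lt v k _ hkl
        (pvCount_set_true_lt _ j (by simp [List.getElem?_eq_getElem hjl, hval]))

-- B's while-loop: each stack item is an accepted cell with its not-yet-explored directions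
def pvB_loop (grid : List (List String)) (ty : String)
    (v : List (List Bool)) (p : List (Int × Int)) (pe : List (Int × Int × Int × Int))
    (stack : List (Int × Int × List (Int × Int))) :
    List (List Bool) × List (Int × Int) × List (Int × Int × Int × Int) :=
  match stack with
  | [] => (v, p, pe)
  | (_, _, []) :: rest => pvB_loop grid ty v p pe rest
  | (r, c, d :: ds) :: rest =>
    let nr := r + d.1
    let nc := c + d.2
    if pvOOB grid nr nc || !(pvGrid grid nr nc == ty) then
      pvB_loop grid ty v p (PySem.Set.add pe (r, c, d.1, d.2)) ((r, c, ds) :: rest)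
    else if pvVisGet v nr nc then
      pvB_loop grid ty v p pe ((r, c, ds) :: rest)
    else
      pvB_loop grid ty (pvVisSet v nr nc) (PySem.Set.add p (nr, nc)) pe
        ((nr, nc, pvDirs) :: (r, c, ds) :: rest)
  termination_by (stack.map (fun it => 1 + it.2.2.length)).sum + 6 * pvUnvisited v
  decreasing_by
  all_goals simp [pvDirs]
  rename_i _h1 h2
  have := pvVisSet_lt v (r + d.1) (c + d.2) (by simpa using h2)
  omega

def pvB_scan : Int → List Int → Int
  | _, [] => 0
  | i, n :: rest => (if i - n > 1 then 1 else 0) + pvB_scan n rest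

-- side counting (same Python code as in A)
def pvB_sides (perimeter : List (Int × Int × Int × Int)) : Int :=
  let sides : PySem.Dict (Int × Int × Int) (List Int) :=
    perimeter.foldl (fun d e =>
      let x := e.1; let y := e.2.1; let dr := e.2.2.1; let dc := e.2.2.2
      if (dr, dc) == pvUP || (dr, dc) == pvDOWN then
        d.insert (x, dr, dc) ((d.getD (x, dr, dc) []) ++ [y])
      else if (dr, dc) == pvLEFT || (dr, dc) == pvRIGHT then
        d.insert (y, dr, dc) ((d.getD (y, dr, dc) []) ++ [x])
      else d) PySem.Dict.empty
  sides.values.foldl (fun total v =>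
    match (PySem.List.sorted v (fun x => x) false).reverse with
    | [] => total + 1            -- unreachable: every group holds at least one value
    | i :: rest => total + 1 + pvB_scan i rest) 0

def connected_regions_alt (grid : List (List String)) :
    List (String × List ((List (Int × Int)) × Int × Int)) :=
  let R : Nat := grid.length
  let C : Nat := (PySem.List.pyGetD grid 0 []).length
  let fin :=
    (PySem.List.pyRange 0 (R : Int) 1).foldl (fun st r =>
      (PySem.List.pyRange 0 (C : Int) 1).foldl (fun st c =>
        if pvVisGet st.1 r c then st
        else
          let ty := pvGrid grid r c
          let res := pvB_loop grid ty (pvVisSet st.1 r c) [(r, c)] [] [(r, c, pvDirs)]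
          (res.1, st.2.insert ty ((st.2.getD ty []) ++
            [(res.2.1, PySem.Set.len res.2.2, pvB_sides res.2.2)]))) st)
      (List.replicate R (List.replicate C false),
        (PySem.Dict.empty : PySem.Dict String (List ((List (Int × Int)) × Int × Int))))
  fin.2.items

-- ===== PRECONDITION & SPEC =====
-- Pre_ excludes exactly the inputs on which the Python A raises IndexError: the empty grid
-- (grid[0] fails) and grids with a row shorter than the first row (grid[r][c] fails when the
-- row-major scan reaches the missing cell).
def Pre_connected_regions (grid : List (List String)) : Prop :=
  grid ≠ [] ∧ ∀ row ∈ grid, (PySem.List.pyGetD grid 0 []).length ≤ row.length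
instance (grid : List (List String)) : Decidable (Pre_connected_regions grid) := by
  unfold Pre_connected_regions; infer_instance

def pvWitness_connected_regions : List (List String) :=
  [["a", "a", "b"], ["b", "a", "b"]]

def Spec_connected_regions (grid : List (List String))
    (out : List (String × List ((List (Int × Int)) × Int × Int))) : Prop :=
  out = connected_regions_alt grid
instance (grid : List (List String))
    (out : List (String × List ((List (Int × Int)) × Int × Int))) :
    Decidable (Spec_connected_regions grid out) := by
  unfold Spec_connected_regions; infer_instance

-- ===== CLAIM (what is proved, stated in full; the proofs are below) =====
def Claim_equal_connected_regions : Prop :=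
  ∀ (grid : List (List String)), Dom_connected_regions grid →
    Pre_connected_regions grid → Spec_connected_regions grid (connected_regions grid)

-- ===== LEMMAS AND PROOFS =====

-- --- Set bookkeeping lemmas ---
theorem pvUpdate_single {α : Type} [BEq α] (s : PySem.Set α) (x : α) :
    PySem.Set.update s [x] = PySem.Set.add s x := by
  simp [PySem.Set.update_cons, PySem.Set.update_nil]

theorem pvUpdate_add {α : Type} [BEq α] [LawfulBEq α] (s t : PySem.Set α) (x : α) :
    PySem.Set.update s (PySem.Set.add t x) = PySem.Set.add (PySem.Set.update s t) x := by
  by_cases hx : x ∈ t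
  · have h1 : PySem.Set.add t x = t := by simp [PySem.Set.add, hx]
    have h2 : x ∈ PySem.Set.update s t := (PySem.Set.mem_update s t x).mpr (Or.inr hx)
    rw [h1]
    have h3 : PySem.Set.add (PySem.Set.update s t) x = PySem.Set.update s t := by
      simp [PySem.Set.add, h2]
    rw [h3]
  · have h1 : PySem.Set.add t x = t ++ [x] := by simp [PySem.Set.add, hx]
    rw [h1, PySem.Set.update, List.foldl_append]
    rfl

theorem pvUpdate_update {α : Type} [BEq α] [LawfulBEq α] (s t : PySem.Set α) (u : List α) :
    PySem.Set.update (PySem.Set.update s t) u = PySem.Set.update s (PySem.Set.update t u) := by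
  induction u generalizing t with
  | nil => simp [PySem.Set.update_nil]
  | cons x u ih =>
    rw [PySem.Set.update_cons, PySem.Set.update_cons, ← ih (t.add x), pvUpdate_add]

-- --- unvisited-count lemmas ---
theorem pvCount_set_true_le (row : List Bool) (j : Nat) :
    ((row.set j true).count false) ≤ row.count false := by
  induction row generalizing j with
  | nil => simp
  | cons b t ih =>
    cases j with
    | zero => cases b <;> simp
    | succ j => have := ih j; simp [List.count_cons]; omega

theorem pvUnvisited_set_le (v : List (List Bool)) (k : Nat) (row' : List Bool)
    (hk : k < v.length) (h : row'.count false ≤ (v[k]).count false) :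
    pvUnvisited (v.set k row') ≤ pvUnvisited v := by
  induction v generalizing k with
  | nil => simp at hk
  | cons r0 t ih =>
    cases k with
    | zero => simp_all [pvUnvisited]
    | succ k =>
      simp only [List.length_cons, Nat.succ_lt_succ_iff] at hk
      simp only [List.getElem_cons_succ] at h
      have := ih k hk h
      simp_all [pvUnvisited]

theorem pvVisSet_le (v : List (List Bool)) (r c : Int) :
    pvUnvisited (pvVisSet v r c) ≤ pvUnvisited v := by
  unfold pvVisSet
  rcases hk : PySem.List.pyIdx? v.length r with _ | k
  · simp [PySem.List.pySetD, PySem.List.pySet?, hk]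
  · have hkl := pvIdx_some_lt hk
    have hrow : PySem.List.pyGetD v r [] = v[k] := by
      simp [PySem.List.pyGetD, PySem.List.pyGet?, hk, List.getElem?_eq_getElem hkl]
    rw [hrow]
    have hsetv : ∀ row', PySem.List.pySetD v r row' = v.set k row' := by
      intro row'; simp [PySem.List.pySetD, PySem.List.pySet?, hk]
    rw [hsetv]
    rcases hj : PySem.List.pyIdx? (v[k].length) c with _ | j
    · have : PySem.List.pySetD (v[k]) c true = v[k] := by
        simp [PySem.List.pySetD, PySem.List.pySet?, hj]
      rw [this]
      exact pvUnvisited_set_le v k _ hkl le_rfl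
    · have : PySem.List.pySetD (v[k]) c true = (v[k]).set j true := by
        simp [PySem.List.pySetD, PySem.List.pySet?, hj]
      rw [this]
      exact pvUnvisited_set_le v k _ hkl (pvCount_set_true_le _ j)

theorem pvUnvisited_pos (v : List (List Bool)) (r c : Int) (h : pvVisGet v r c = false) :
    1 ≤ pvUnvisited v :=
  Nat.one_le_iff_ne_zero.mpr (fun h0 => by
    have := pvVisSet_lt v r c h; omega)

-- --- invariants of A's dfs ---
theorem pvA_dfs_mono (grid : List (List String)) (ty : String) :
    ∀ (f : Nat) (v : List (List Bool)) (r c : Int),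
      pvUnvisited (pvA_dfs grid ty f v r c).1 ≤ pvUnvisited v := by
  intro f
  induction f with
  | zero => intro v r c; simp [pvA_dfs]
  | succ f ih =>
    intro v r c
    rw [pvA_dfs]
    split
    · simp
    · have hfold : ∀ (ds : List (Int × Int))
          (st : List (List Bool) × List (Int × Int) × List (Int × Int × Int × Int)),
          pvUnvisited ((ds.foldl (pvA_step grid ty (pvA_dfs grid ty f) r c) st)).1
            ≤ pvUnvisited st.1 := by
        intro ds
        induction ds with
        | nil => intro st; simp
        | cons d ds ihd =>
          intro st
          have hstep : pvUnvisited ((pvA_step grid ty (pvA_dfs grid ty f) r c st d)).1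
              ≤ pvUnvisited st.1 := by
            simp only [pvA_step]
            split_ifs <;> simp [ih]
          simpa using le_trans (ihd _) hstep
      exact le_trans (hfold pvDirs _) (pvVisSet_le v r c)

theorem pvA_dfs_nodup (grid : List (List String)) (ty : String) :
    ∀ (f : Nat) (v : List (List Bool)) (r c : Int),
      ((pvA_dfs grid ty f v r c).2.1).Nodup ∧ ((pvA_dfs grid ty f v r c).2.2).Nodup := by
  intro f
  induction f with
  | zero => intro v r c; simp [pvA_dfs]
  | succ f _ =>
    intro v r c
    rw [pvA_dfs]
    split
    · simp
    · have hfold : ∀ (ds : List (Int × Int))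
          (st : List (List Bool) × List (Int × Int) × List (Int × Int × Int × Int)),
          st.2.1.Nodup → st.2.2.Nodup →
          ((ds.foldl (pvA_step grid ty (pvA_dfs grid ty f) r c) st)).2.1.Nodup ∧
          ((ds.foldl (pvA_step grid ty (pvA_dfs grid ty f) r c) st)).2.2.Nodup := by
        intro ds
        induction ds with
        | nil => intro st h1 h2; exact ⟨h1, h2⟩
        | cons d ds ihd =>
          intro st h1 h2
          have hstep : ((pvA_step grid ty (pvA_dfs grid ty f) r c st d)).2.1.Nodup ∧
              ((pvA_step grid ty (pvA_dfs grid ty f) r c st d)).2.2.Nodup := by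
            simp only [pvA_step]
            split_ifs <;>
              exact ⟨by first | exact h1 | exact PySem.Set.nodup_update _ _ h1,
                     by first | exact h2 | exact PySem.Set.nodup_add _ _ h2 |
                          exact PySem.Set.nodup_update _ _ h2⟩
          simpa using ihd _ hstep.1 hstep.2
      exact hfold pvDirs _ (by simp) (by simp)

theorem pvA_dfs_plots_ne (grid : List (List String)) (ty : String)
    (f : Nat) (v : List (List Bool)) (r c : Int)
    (hg : (pvOOB grid r c || pvVisGet v r c || !(pvGrid grid r c == ty)) = false) :
    (pvA_dfs grid ty (f + 1) v r c).2.1 ≠ [] := by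
  rw [pvA_dfs, if_neg (by simp [hg])]
  have hfold : ∀ (ds : List (Int × Int))
      (st : List (List Bool) × List (Int × Int) × List (Int × Int × Int × Int)),
      st.2.1 ≠ [] →
      ((ds.foldl (pvA_step grid ty (pvA_dfs grid ty f) r c) st)).2.1 ≠ [] := by
    intro ds
    induction ds with
    | nil => intro st h; exact h
    | cons d ds ihd =>
      intro st h
      have hstep : ((pvA_step grid ty (pvA_dfs grid ty f) r c st d)).2.1 ≠ [] := by
        simp only [pvA_step]
        split_ifs
        · exact h
        · exact h
        · rw [PySem.Set.update_eq_append_filter]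
          simp [h]
      simpa using ihd _ hstep
  exact hfold pvDirs _ (by simp)

-- --- the simulation lemma: B's explicit stack runs A's direction loop ---
theorem pvSim (grid : List (List String)) (ty : String) :
    ∀ (f : Nat) (ds : List (Int × Int)) (v0 : List (List Bool)) (lp0 : List (Int × Int))
      (lpe0 : List (Int × Int × Int × Int)) (p : List (Int × Int))
      (pe : List (Int × Int × Int × Int)) (rest : List (Int × Int × List (Int × Int)))
      (r c : Int),
      pvUnvisited v0 ≤ f →
      pvB_loop grid ty v0 (PySem.Set.update p lp0) (PySem.Set.update pe lpe0) ((r, c, ds) :: rest)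
        = pvB_loop grid ty
            (ds.foldl (pvA_step grid ty (pvA_dfs grid ty f) r c) (v0, lp0, lpe0)).1
            (PySem.Set.update p (ds.foldl (pvA_step grid ty (pvA_dfs grid ty f) r c) (v0, lp0, lpe0)).2.1)
            (PySem.Set.update pe (ds.foldl (pvA_step grid ty (pvA_dfs grid ty f) r c) (v0, lp0, lpe0)).2.2)
            rest := by
  intro f
  induction f using Nat.strong_induction_on with
  | _ f ihf =>
  intro ds
  induction ds with
  | nil =>
    intro v0 lp0 lpe0 p pe rest r c _
    rw [pvB_loop.eq_2]
    rfl
  | cons d ds ihd =>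
    intro v0 lp0 lpe0 p pe rest r c hf
    rw [pvB_loop.eq_3]
    by_cases h1 : (pvOOB grid (r + d.1) (c + d.2) || !(pvGrid grid (r + d.1) (c + d.2) == ty)) = true
    · rw [if_pos h1, ← pvUpdate_add pe lpe0 (r, c, d.1, d.2),
        ihd v0 lp0 (PySem.Set.add lpe0 (r, c, d.1, d.2)) p pe rest r c hf]
      have hstep : pvA_step grid ty (pvA_dfs grid ty f) r c (v0, lp0, lpe0) d
          = (v0, lp0, PySem.Set.add lpe0 (r, c, d.1, d.2)) := by
        simp only [pvA_step]
        rw [if_pos h1]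
      rw [List.foldl_cons, hstep]
    · rw [if_neg h1]
      by_cases h2 : pvVisGet v0 (r + d.1) (c + d.2) = true
      · rw [if_pos h2, ihd v0 lp0 lpe0 p pe rest r c hf]
        have hstep : pvA_step grid ty (pvA_dfs grid ty f) r c (v0, lp0, lpe0) d
            = (v0, lp0, lpe0) := by
          simp only [pvA_step]
          rw [if_neg h1, if_pos h2]
        rw [List.foldl_cons, hstep]
      · rw [if_neg h2]
        have h2f : pvVisGet v0 (r + d.1) (c + d.2) = false := by
          simpa using h2
        have hpos : 1 ≤ pvUnvisited v0 := pvUnvisited_pos v0 _ _ h2f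
        obtain ⟨k, rfl⟩ : ∃ k, f = k + 1 := ⟨f - 1, by omega⟩
        have hguard : ¬ ((pvOOB grid (r + d.1) (c + d.2) || pvVisGet v0 (r + d.1) (c + d.2)
            || !(pvGrid grid (r + d.1) (c + d.2) == ty)) = true) := by
          simp only [Bool.or_eq_true, not_or] at h1 ⊢
          exact ⟨⟨h1.1, by simp [h2f]⟩, h1.2⟩
        have hdfs : pvA_dfs grid ty (k + 1) v0 (r + d.1) (c + d.2)
            = pvDirs.foldl (pvA_step grid ty (pvA_dfs grid ty k) (r + d.1) (c + d.2))
                (pvVisSet v0 (r + d.1) (c + d.2), [(r + d.1, c + d.2)], []) := by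
          rw [pvA_dfs, if_neg hguard]
        have hfuel : pvUnvisited (pvVisSet v0 (r + d.1) (c + d.2)) ≤ k := by
          have := pvVisSet_lt v0 (r + d.1) (c + d.2) h2f
          omega
        have hinner := ihf k (by omega) pvDirs (pvVisSet v0 (r + d.1) (c + d.2))
          [(r + d.1, c + d.2)] [] (PySem.Set.update p lp0) (PySem.Set.update pe lpe0)
          ((r, c, ds) :: rest) (r + d.1) (c + d.2) hfuel
        rw [pvUpdate_single, PySem.Set.update_nil] at hinner
        rw [hinner]
        simp only [← hdfs]
        rw [pvUpdate_update p lp0, pvUpdate_update pe lpe0]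
        have hmono : pvUnvisited (pvA_dfs grid ty (k + 1) v0 (r + d.1) (c + d.2)).1
            ≤ k + 1 := le_trans (pvA_dfs_mono grid ty (k + 1) v0 (r + d.1) (c + d.2)) hf
        rw [ihd (pvA_dfs grid ty (k + 1) v0 (r + d.1) (c + d.2)).1
          (PySem.Set.update lp0 (pvA_dfs grid ty (k + 1) v0 (r + d.1) (c + d.2)).2.1)
          (PySem.Set.update lpe0 (pvA_dfs grid ty (k + 1) v0 (r + d.1) (c + d.2)).2.2)
          p pe rest r c hmono]
        have hstep : pvA_step grid ty (pvA_dfs grid ty (k + 1)) r c (v0, lp0, lpe0) d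
            = ((pvA_dfs grid ty (k + 1) v0 (r + d.1) (c + d.2)).1,
               PySem.Set.update lp0 (pvA_dfs grid ty (k + 1) v0 (r + d.1) (c + d.2)).2.1,
               PySem.Set.update lpe0 (pvA_dfs grid ty (k + 1) v0 (r + d.1) (c + d.2)).2.2) := by
          simp only [pvA_step]
          rw [if_neg h1, if_neg h2]
        rw [List.foldl_cons, hstep]

-- the two side-counting blocks are the same code
theorem pvScan_eq : pvB_scan = pvA_scan := by
  funext i l
  induction l generalizing i with
  | nil => rfl
  | cons n rest ih => simp [pvA_scan, pvB_scan, ih]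

theorem pvSides_eq : pvB_sides = pvA_sides := by
  funext perimeter
  simp only [pvA_sides, pvB_sides, pvScan_eq]

-- per-cell: one outer-scan iteration of A equals one of B
theorem pvCell (grid : List (List String))
    (st : (List (List Bool)) × PySem.Dict String (List ((List (Int × Int)) × Int × Int)))
    (r c : Int) (hr0 : 0 ≤ r) (hr : r < (grid.length : Int))
    (hc0 : 0 ≤ c) (hc : c < (((PySem.List.pyGetD grid 0 []).length : Int))) :
    (if pvVisGet st.1 r c then st
     else
       let ty := pvGrid grid r c
       let res := pvA_dfs grid ty (pvUnvisited st.1 + 1) st.1 r c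
       if res.2.1 ≠ [] then
         (res.1, st.2.insert ty ((st.2.getD ty []) ++
           [(res.2.1, PySem.Set.len res.2.2, pvA_sides res.2.2)]))
       else (res.1, st.2))
    = (if pvVisGet st.1 r c then st
       else
         let ty := pvGrid grid r c
         let res := pvB_loop grid ty (pvVisSet st.1 r c) [(r, c)] [] [(r, c, pvDirs)]
         (res.1, st.2.insert ty ((st.2.getD ty []) ++
           [(res.2.1, PySem.Set.len res.2.2, pvB_sides res.2.2)]))) := by
  by_cases hv : pvVisGet st.1 r c = true
  · rw [if_pos hv, if_pos hv]
  · rw [if_neg hv, if_neg hv]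
    have hvf : pvVisGet st.1 r c = false := by simpa using hv
    have hguard : ¬ ((pvOOB grid r c || pvVisGet st.1 r c
        || !(pvGrid grid r c == pvGrid grid r c)) = true) := by
      simp [pvOOB, hvf]
      omega
    have hdfs : pvA_dfs grid (pvGrid grid r c) (pvUnvisited st.1 + 1) st.1 r c
        = pvDirs.foldl (pvA_step grid (pvGrid grid r c)
            (pvA_dfs grid (pvGrid grid r c) (pvUnvisited st.1)) r c)
            (pvVisSet st.1 r c, [(r, c)], []) := by
      rw [pvA_dfs, if_neg hguard]
    have hfuel : pvUnvisited (pvVisSet st.1 r c) ≤ pvUnvisited st.1 := pvVisSet_le st.1 r c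
    have hsim := pvSim grid (pvGrid grid r c) (pvUnvisited st.1) pvDirs
      (pvVisSet st.1 r c) [(r, c)] [] [] [] [] r c hfuel
    rw [pvUpdate_single, PySem.Set.update_nil, pvB_loop.eq_1] at hsim
    have hadd : PySem.Set.add ([] : PySem.Set (Int × Int)) (r, c) = [(r, c)] := by
      simp [PySem.Set.add]
    rw [hadd] at hsim
    rw [← hdfs] at hsim
    have hnd := pvA_dfs_nodup grid (pvGrid grid r c) (pvUnvisited st.1 + 1) st.1 r c
    have hne := pvA_dfs_plots_ne grid (pvGrid grid r c) (pvUnvisited st.1) st.1 r c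
      (by simpa using hguard)
    simp only []
    rw [if_pos hne, hsim]
    rw [PySem.Set.update_nil_left, PySem.Set.update_nil_left,
      PySem.Set.ofList_eq_self_of_nodup _ hnd.1, PySem.Set.ofList_eq_self_of_nodup _ hnd.2,
      pvSides_eq]

theorem pv_main (grid : List (List String)) :
    connected_regions grid = connected_regions_alt grid := by
  unfold connected_regions connected_regions_alt
  dsimp only
  refine congrArg (fun z => PySem.Dict.items (Prod.snd z)) ?_
  apply PySem.List.foldl_congr_mem
  intro acc r hrmem
  apply PySem.List.foldl_congr_mem
  intro acc2 c hcmem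
  obtain ⟨hr0, hr⟩ := PySem.List.mem_pyRange_one.mp hrmem
  obtain ⟨hc0, hc⟩ := PySem.List.mem_pyRange_one.mp hcmem
  exact pvCell grid acc2 r c hr0 (by simpa using hr) hc0 (by simpa using hc)

-- ===== VERDICT (by name: the statement is the Claim_ definition above) =====
theorem connected_regions_spec : Claim_equal_connected_regions := by
  intro grid _ _
  unfold Spec_connected_regions
  exact pv_main grid
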